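/- GENERATED by mk_final_copies.py from the proof of the farm's unit `draw_line` (farm:draw_line.1: Proof.lean) as the
   re-elaboration sweep compiled it — do not edit. -/
import Asan.CheckWalk
import Vorbis.Spec.Units.draw_line
import Vorbis.Spec.Worked.draw_line_Lemmas

open X86 X86.User Asan Vorbis

set_option maxRecDepth 4000
set_option maxHeartbeats 16000000

/-- `draw_line` satisfies its contract. Three pieces: `hloop` (the loop 0x108837 of C line 2098, entered on two paths: its invariant
is `x0 < x`, the slot of `x1' = min(x1, n)`, the footprint, the stack slots), `hmid` (from cut 2 = 0x10877c, after the second `abs`, to the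
loop head or the exit: four paths) and the straight code from the entry over the two calls of `abs` and the `idiv`. The pure facts
(`idiv` does not fault, the address of `output[x]`, of `inverse_db_table[y & 255]`) are in Lemmas.lean. -/
theorem Vorbis.Spec.Worked.draw_line_ok : Vorbis.Spec.draw_line.Statement := by
  intro Lay hLay μ hμ u₀ hcode h_abs hload4 others frames u ret he hpre
  v_entry he
  have habs := h_abs others frames
  obtain ⟨hsh, hdb, hne, hadx, hdy, hlive⟩ := hpre
  have hsp := hsh.rsp
  -- the signed 32-bit arguments in the walker's form (`s32` is an abbreviation: `omega` must see one atom per argument)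
  simp only [Vorbis.Spec.s32] at hne hadx hdy hlive
  have hd : Word.part Width.w32 (u.reg .rcx) - Word.part Width.w32 (u.reg .rsi) ≠ 0#32 :=
    Vorbis.Spec.draw_line.sub_ne_zero32 _ _ hne
  have hdy' : Word.part Width.w32 (u.reg .r8) - Word.part Width.w32 (u.reg .rdx) ≠ 0x80000000#32 :=
    Vorbis.Spec.draw_line.sub_ne_intMin _ _ hdy.1 hdy.2
  -- the loop at 0x108837 (C line 2098), entered twice: once and for all
  have hloop : ∀ (s : State) (xb X1' : BitVec 32),
      s.rip = Vorbis.L.draw_line.loop1 →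
      s.reg .rsp = u.reg .rsp - 88 →
      s.reg .rbx = Word.ofBV xb →
      RegsKept [Reg.r13, Reg.rdi, Reg.r15, Reg.rbx, Reg.rbp, Reg.r12, Reg.r14, Reg.rsp, Reg.rax, Reg.rcx, Reg.rdx, Reg.rsi,
        Reg.r8, Reg.r9, Reg.r10, Reg.r11, Reg.r16, Reg.r17, Reg.r18, Reg.r19, Reg.r20, Reg.r21, Reg.r22, Reg.r23, Reg.r24,
        Reg.r25, Reg.r26, Reg.r27, Reg.r28, Reg.r29, Reg.r30, Reg.r31] u s →
      Mem.EqOn Vorbis.L.textLo Vorbis.L.textHi u₀.mem s.mem →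
      s.flags.get Flag.df = false →
      s.mxcsr &&& 8064 = 8064 →
      SseOK s →
      Mem.SameExcept [⟨(u.reg .rsp).toNat - 112, (u.reg .rsp).toNat⟩,
        ⟨(u.reg .rdi).toNat + 4 * ((Word.part Width.w32 (u.reg .rsi)).toInt).toNat,
         (u.reg .rdi).toNat + 4 * (min ((Word.part Width.w32 (u.reg .rcx)).toInt) ((Word.part Width.w32 (u.reg .r9)).toInt)).toNat⟩] u.mem s.mem →
      ShadowUntouched u.mem s.mem →
      UInt64.ofNat (s.mem.readLE (u.reg .rsp) 8) = ret →
      UInt64.ofNat (s.mem.readLE (u.reg .rsp - 8) 8) = u.reg .r15 →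
      UInt64.ofNat (s.mem.readLE (u.reg .rsp - 16) 8) = u.reg .r14 →
      UInt64.ofNat (s.mem.readLE (u.reg .rsp - 24) 8) = u.reg .r13 →
      UInt64.ofNat (s.mem.readLE (u.reg .rsp - 32) 8) = u.reg .r12 →
      UInt64.ofNat (s.mem.readLE (u.reg .rsp - 40) 8) = u.reg .rbp →
      UInt64.ofNat (s.mem.readLE (u.reg .rsp - 48) 8) = u.reg .rbx →
      UInt64.ofNat (s.mem.readLE (u.reg .rsp - 80) 8) = u.reg .rdi →
      s.mem.readLE (u.reg .rsp - 84) 4 = X1'.toNat →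
      (Word.part Width.w32 (u.reg .rsi)).toInt < xb.toInt →
      0 ≤ (Word.part Width.w32 (u.reg .rsi)).toInt →
      (Word.part Width.w32 (u.reg .rsi)).toInt < X1'.toInt →
      X1'.toInt = min ((Word.part Width.w32 (u.reg .rcx)).toInt) ((Word.part Width.w32 (u.reg .r9)).toInt) →
      LiveIn others frames (u.reg .rdi).toNat (4 * ((Word.part Width.w32 (u.reg .r9)).toInt).toNat) →
      ReachVia Lay μ WayInv s (Returned (conv u₀) (Vorbis.Spec.draw_line.spec others frames) u ret) := by
    intro s xb X1' w_rip w_rsp w_rbx w_kept w_eq hdf hmx w_sse hsame hun hs0 hs1 hs2 hs3 hs4 hs5 hs6 hs7 hs8 hx0 h0 hlt hX1' hl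
    -- where `output[0 .. n)` is: one arithmetic fact (`n > 0` because `0 ≤ x0 < x1' ≤ n`)
    have hmn : min ((Word.part Width.w32 (u.reg .rcx)).toInt) ((Word.part Width.w32 (u.reg .r9)).toInt) ≤ (Word.part Width.w32 (u.reg .r9)).toInt :=
      Int.min_le_right _ _
    have hwhere := hl.where_ hsh.inv hsh.offText (by omega)
    obtain ⟨hw1, hw2, hw3⟩ := hwhere
    u_loop [xb] (fun v => (X1'.toInt - (Word.part Width.w32 (v.reg .rbx)).toInt).toNat)
    u_walk hcode [hμ.vendor] until [Vorbis.L.draw_line.loop1] span [Vorbis.L.textLo, Vorbis.L.textHi] side (v_side)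
    case check_108805 =>
      -- 0x108805 (C line 2105): the load of `output[x]`, `x0 < x < x1' ≤ n`
      obtain ⟨ha, hlo, hhi, hmn'⟩ := Vorbis.Spec.draw_line.pixel_addr (u.reg .rdi) _ xb _ _ h0 (Int.le_of_lt hx0)
        (by omega) hmn (by omega)
      have hun' : ShadowUntouched u.mem s_108805.mem := by v_untouched
      exact hl.accSmall hsh.inv hun' _ 4 (by decide) (by omega) (by omega)
    case check_10881a =>
      -- 0x10881a (C line 2105): the load of `inverse_db_table[y & 255]`: the index is a byte (SH5)
      have hun' : ShadowUntouched u.mem s_10881a.mem := by v_untouched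
      refine Vorbis.check_small_other hsh.inv hun' hdb (by decide) ?_ ?_
      · exact (Vorbis.Spec.draw_line.table_in _).1
      · exact (Vorbis.Spec.draw_line.table_in _).2
    case side_code =>
      -- 0x10882e: the store to `output[x]` misses the text
      obtain ⟨ha, hlo, hhi, hmn'⟩ := Vorbis.Spec.draw_line.pixel_addr (u.reg .rdi) _ xb _ _ h0 (Int.le_of_lt hx0)
        (by omega) hmn (by omega)
      right
      rw [ha]
      omega
    case check_108805 =>
      -- 0x108805 (C line 2105): the load of `output[x]`, `x0 < x < x1' ≤ n`
      obtain ⟨ha, hlo, hhi, hmn'⟩ := Vorbis.Spec.draw_line.pixel_addr (u.reg .rdi) _ xb _ _ h0 (Int.le_of_lt hx0)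
        (by omega) hmn (by omega)
      have hun' : ShadowUntouched u.mem s_108805.mem := by v_untouched
      exact hl.accSmall hsh.inv hun' _ 4 (by decide) (by omega) (by omega)
    case check_10881a =>
      -- 0x10881a (C line 2105): the load of `inverse_db_table[y & 255]`: the index is a byte (SH5)
      have hun' : ShadowUntouched u.mem s_10881a.mem := by v_untouched
      refine Vorbis.check_small_other hsh.inv hun' hdb (by decide) ?_ ?_
      · exact (Vorbis.Spec.draw_line.table_in _).1
      · exact (Vorbis.Spec.draw_line.table_in _).2
    case side_code =>
      -- 0x10882e: the store to `output[x]` misses the text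
      obtain ⟨ha, hlo, hhi, hmn'⟩ := Vorbis.Spec.draw_line.pixel_addr (u.reg .rdi) _ xb _ _ h0 (Int.le_of_lt hx0)
        (by omega) hmn (by omega)
      right
      rw [ha]
      omega
    · -- x1' ≤ x: the exit 0x108856, walked to the `ret`
      refine ReachVia.done (Or.inl ?_)
      v_returned
      show ShadowUntouched u.mem s_108864.mem
      v_untouched
    · -- the back edge 0x108834 → 0x108837, `err < adx` (0x108849 taken: `y += base`)
      obtain ⟨ha, hlo, hhi, hmn'⟩ := Vorbis.Spec.draw_line.pixel_addr (u.reg .rdi) _ xb _ _ h0 (Int.le_of_lt hx0)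
        (by omega) hmn (by omega)
      have hinc := Vorbis.Spec.draw_line.toInt_add_one xb X1' (Int.lt_of_not_ge hbr_10883b)
      -- (the footprint — the store went to `output[x]`, inside `output[x0 .. min(x1, n))`: `ha`, `hlo`, `hhi` — and the stack
      -- slots are closed by `u_loop_back` itself)
      u_loop_back [xb + 1#32]
      · -- the direction flag: the checks kept it, `add` writes status flags only
        rw [w_flags]
        simp only [X86.User.df_setStatus]
        exact w_df_10881a
      · -- the MXCSR masks after `mulss`
        rw [w_mxcsr]
        exact hmx_108824
      · exact SseOK.of_masks (by rw [w_mxcsr]; exact hmx_108824)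
      · -- still no store to the shadow
        v_untouched
      · -- x0 < x + 1
        omega
      · -- the measure: x1' − x decreases
        rw [w_rbx, X86.Word.part_w32_ofBV32, X86.Word.part_w32_ofBV32]
        omega
    · -- the back edge 0x108834 → 0x108837, `err ≥ adx` (`err -= adx ; y += sy`)
      obtain ⟨ha, hlo, hhi, hmn'⟩ := Vorbis.Spec.draw_line.pixel_addr (u.reg .rdi) _ xb _ _ h0 (Int.le_of_lt hx0)
        (by omega) hmn (by omega)
      have hinc := Vorbis.Spec.draw_line.toInt_add_one xb X1' (Int.lt_of_not_ge hbr_10883b)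
      -- (the footprint — the store went to `output[x]`, inside `output[x0 .. min(x1, n))`: `ha`, `hlo`, `hhi` — and the stack
      -- slots are closed by `u_loop_back` itself)
      u_loop_back [xb + 1#32]
      · -- the direction flag: the checks kept it, `add` writes status flags only
        rw [w_flags]
        simp only [X86.User.df_setStatus]
        exact w_df_10881a
      · -- the MXCSR masks after `mulss`
        rw [w_mxcsr]
        exact hmx_108824
      · exact SseOK.of_masks (by rw [w_mxcsr]; exact hmx_108824)
      · -- still no store to the shadow
        v_untouched
      · -- x0 < x + 1
        omega
      · -- the measure: x1' − x decreases
        rw [w_rbx, X86.Word.part_w32_ofBV32, X86.Word.part_w32_ofBV32]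
        omega
  -- from cut 2 (0x10877c, after `abs(base)` on both arms of `dy < 0`) to the loop head or the exit
  have hmid : ∀ s : State,
      s.rip = Vorbis.L.draw_line.cut2 →
      s.reg .rsp = u.reg .rsp - 88 →
      s.reg .r14 = Word.ofBV (Word.part Width.w32 (u.reg .rsi)) →
      s.reg .rbp = Word.ofBV (Word.part Width.w32 (u.reg .rcx)) →
      RegsKept [Reg.r13, Reg.rdi, Reg.r15, Reg.rbx, Reg.rbp, Reg.r12, Reg.r14, Reg.rsp, Reg.rax, Reg.rcx, Reg.rdx, Reg.rsi,
        Reg.r8, Reg.r9, Reg.r10, Reg.r11, Reg.r16, Reg.r17, Reg.r18, Reg.r19, Reg.r20, Reg.r21, Reg.r22, Reg.r23, Reg.r24,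
        Reg.r25, Reg.r26, Reg.r27, Reg.r28, Reg.r29, Reg.r30, Reg.r31] u s →
      Mem.EqOn Vorbis.L.textLo Vorbis.L.textHi u₀.mem s.mem →
      s.flags.get Flag.df = false →
      s.mxcsr &&& 8064 = 8064 →
      SseOK s →
      Mem.SameExcept [⟨(u.reg .rsp).toNat - 112, (u.reg .rsp).toNat⟩] u.mem s.mem →
      ShadowUntouched u.mem s.mem →
      UInt64.ofNat (s.mem.readLE (u.reg .rsp) 8) = ret →
      UInt64.ofNat (s.mem.readLE (u.reg .rsp - 8) 8) = u.reg .r15 →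
      UInt64.ofNat (s.mem.readLE (u.reg .rsp - 16) 8) = u.reg .r14 →
      UInt64.ofNat (s.mem.readLE (u.reg .rsp - 24) 8) = u.reg .r13 →
      UInt64.ofNat (s.mem.readLE (u.reg .rsp - 32) 8) = u.reg .r12 →
      UInt64.ofNat (s.mem.readLE (u.reg .rsp - 40) 8) = u.reg .rbp →
      UInt64.ofNat (s.mem.readLE (u.reg .rsp - 48) 8) = u.reg .rbx →
      UInt64.ofNat (s.mem.readLE (u.reg .rsp - 80) 8) = u.reg .rdi →
      s.mem.readLE (u.reg .rsp - 84) 4 = (Word.part Width.w32 (u.reg .r9)).toNat →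
      ReachVia Lay μ WayInv s (Returned (conv u₀) (Vorbis.Spec.draw_line.spec others frames) u ret) := by
    intro s w_rip w_rsp w_r14 w_rbp w_kept w_eq w_df w_mx w_sse hsame hun hs0 hs1 hs2 hs3 hs4 hs5 hs6 hs7 hs8
    -- 0x10877c … (C lines 2094–2098): `ady`, `x1' = min(x1, n)` on two arms, `x0 < x1'`?, the first pixel, `++x`
    u_walk hcode [hμ.vendor] until [Vorbis.L.draw_line.loop1] span [Vorbis.L.textLo, Vorbis.L.textHi] side (v_side)
    case check_1087b1 =>
      -- 0x1087b1 (C line 2097): the load of `output[x0]`, reached under `x0 < x1' = min(x1, n)`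
      simp only [Vorbis.Spec.draw_line.ofNat_toNat32] at hbr_10879c
      obtain ⟨hm1, hmn, hm3⟩ := Vorbis.Spec.draw_line.min_cases (Word.part Width.w32 (u.reg .rcx)).toInt
        (Word.part Width.w32 (u.reg .r9)).toInt
      obtain ⟨h0, hl⟩ := hlive (by omega)
      obtain ⟨hw1, hw2, hw3⟩ := hl.where_ hsh.inv hsh.offText (by omega)
      obtain ⟨ha, hlo, hhi, hmn'⟩ := Vorbis.Spec.draw_line.pixel_addr (u.reg .rdi) _ _ _ _ h0 (Int.le_refl _)
        (by omega) hmn (by omega)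
      have hun' : ShadowUntouched u.mem s_1087b1.mem := by v_untouched
      exact hl.accSmall hsh.inv hun' _ 4 (by decide) (by omega) (by omega)
    case check_1087c4 =>
      -- 0x1087c4 (C line 2097): the load of `inverse_db_table[y & 255]`: the index is a byte (SH5)
      have hun' : ShadowUntouched u.mem s_1087c4.mem := by v_untouched
      refine Vorbis.check_small_other hsh.inv hun' hdb (by decide) ?_ ?_
      · exact (Vorbis.Spec.draw_line.table_in _).1
      · exact (Vorbis.Spec.draw_line.table_in _).2
    case side_code =>
      -- 0x1087d7: the store to `output[x0]` misses the text
      simp only [Vorbis.Spec.draw_line.ofNat_toNat32] at hbr_10879c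
      obtain ⟨hm1, hmn, hm3⟩ := Vorbis.Spec.draw_line.min_cases (Word.part Width.w32 (u.reg .rcx)).toInt
        (Word.part Width.w32 (u.reg .r9)).toInt
      obtain ⟨h0, hl⟩ := hlive (by omega)
      obtain ⟨hw1, hw2, hw3⟩ := hl.where_ hsh.inv hsh.offText (by omega)
      obtain ⟨ha, hlo, hhi, hmn'⟩ := Vorbis.Spec.draw_line.pixel_addr (u.reg .rdi) _ _ _ _ h0 (Int.le_refl _)
        (by omega) hmn (by omega)
      right
      rw [ha]
      omega
    case check_1087b1 =>
      -- 0x1087b1 (C line 2097): the load of `output[x0]`, reached under `x0 < x1' = min(x1, n)`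
      simp only [Vorbis.Spec.draw_line.ofNat_toNat32_mod] at hbr_10879c
      obtain ⟨hm1, hmn, hm3⟩ := Vorbis.Spec.draw_line.min_cases (Word.part Width.w32 (u.reg .rcx)).toInt
        (Word.part Width.w32 (u.reg .r9)).toInt
      obtain ⟨h0, hl⟩ := hlive (by omega)
      obtain ⟨hw1, hw2, hw3⟩ := hl.where_ hsh.inv hsh.offText (by omega)
      obtain ⟨ha, hlo, hhi, hmn'⟩ := Vorbis.Spec.draw_line.pixel_addr (u.reg .rdi) _ _ _ _ h0 (Int.le_refl _)
        (by omega) hmn (by omega)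
      have hun' : ShadowUntouched u.mem s_1087b1.mem := by v_untouched
      exact hl.accSmall hsh.inv hun' _ 4 (by decide) (by omega) (by omega)
    case check_1087c4 =>
      -- 0x1087c4 (C line 2097): the load of `inverse_db_table[y & 255]`: the index is a byte (SH5)
      have hun' : ShadowUntouched u.mem s_1087c4.mem := by v_untouched
      refine Vorbis.check_small_other hsh.inv hun' hdb (by decide) ?_ ?_
      · exact (Vorbis.Spec.draw_line.table_in _).1
      · exact (Vorbis.Spec.draw_line.table_in _).2
    case side_code =>
      -- 0x1087d7: the store to `output[x0]` misses the text
      simp only [Vorbis.Spec.draw_line.ofNat_toNat32_mod] at hbr_10879c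
      obtain ⟨hm1, hmn, hm3⟩ := Vorbis.Spec.draw_line.min_cases (Word.part Width.w32 (u.reg .rcx)).toInt
        (Word.part Width.w32 (u.reg .r9)).toInt
      obtain ⟨h0, hl⟩ := hlive (by omega)
      obtain ⟨hw1, hw2, hw3⟩ := hl.where_ hsh.inv hsh.offText (by omega)
      obtain ⟨ha, hlo, hhi, hmn'⟩ := Vorbis.Spec.draw_line.pixel_addr (u.reg .rdi) _ _ _ _ h0 (Int.le_refl _)
        (by omega) hmn (by omega)
      right
      rw [ha]
      omega
    · -- x1' ≤ x0 (0x10879c taken): nothing is drawn; the exit 0x108856, walked to the `ret`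
      refine ReachVia.done ?_
      v_returned
      show ShadowUntouched u.mem s_108864.mem
      v_untouched
    · -- the first pixel is drawn, x1' = n (x1 > n): the loop head 0x108837 with x = x0 + 1
      simp only [Vorbis.Spec.draw_line.ofNat_toNat32] at hbr_10879c
      obtain ⟨hm1, hmn, hm3⟩ := Vorbis.Spec.draw_line.min_cases (Word.part Width.w32 (u.reg .rcx)).toInt
        (Word.part Width.w32 (u.reg .r9)).toInt
      obtain ⟨h0, hl⟩ := hlive (by omega)
      obtain ⟨hw1, hw2, hw3⟩ := hl.where_ hsh.inv hsh.offText (by omega)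
      obtain ⟨ha, hlo, hhi, hmn'⟩ := Vorbis.Spec.draw_line.pixel_addr (u.reg .rdi) _ _ _ _ h0 (Int.le_refl _)
        (by omega) hmn (by omega)
      have hlt : (Word.part Width.w32 (u.reg .rsi)).toInt < (Word.part Width.w32 (u.reg .r9)).toInt := by omega
      have hinc := Vorbis.Spec.draw_line.toInt_add_one _ _ hlt
      refine hloop s_1087e4 (Word.part Width.w32 (u.reg .rsi) + 1#32) (Word.part Width.w32 (u.reg .r9)) w_rip w_rsp ?_ w_kept
        w_eq ?_ ?_ ?_ ?_ ?_ ?_ ?_ ?_ ?_ ?_ ?_ ?_ ?_ ?_ ?_ h0 hlt ?_ hl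
      · rw [w_rbx, Vorbis.Spec.draw_line.lea_add_one]
      · -- the direction flag: the checks kept it
        rw [w_flags]
        exact w_df_1087c4
      · -- the MXCSR masks after `mulss`
        rw [w_mxcsr]
        exact hmx_1087cd
      · exact SseOK.of_masks (by rw [w_mxcsr]; exact hmx_1087cd)
      · -- the footprint: the store went to `output[x0]`, the first dword of `output[x0 .. min(x1, n))`
        rw [w_mem]
        refine Mem.SameExcept.step_writeLE' _ _ _ ?_ ?_ ?_
        · u_same
        · rw [ha]
          omega
        · simp only [X86.User.inSpans_cons, X86.User.inSpans_nil, or_false]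
          right
          rw [ha]
          constructor
          · omega
          · omega
      · -- no store went to the shadow
        v_untouched
      · u_frame hs0
      · u_frame hs1
      · u_frame hs2
      · u_frame hs3
      · u_frame hs4
      · u_frame hs5
      · u_frame hs6
      · u_frame hs7
      · -- the slot of x1' = n (x1 > n)
        u_frame hs8
      · -- x0 < x0 + 1
        omega
      · omega
    · -- x1' ≤ x0 (0x10879c taken): nothing is drawn; the exit 0x108856, walked to the `ret`
      refine ReachVia.done ?_
      v_returned
      show ShadowUntouched u.mem s_108864.mem
      v_untouched
    · -- the first pixel is drawn, x1' = x1 (x1 ≤ n: 0x108793 overwrote the slot): the loop head 0x108837 with x = x0 + 1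
      simp only [Vorbis.Spec.draw_line.ofNat_toNat32_mod] at hbr_10879c
      obtain ⟨hm1, hmn, hm3⟩ := Vorbis.Spec.draw_line.min_cases (Word.part Width.w32 (u.reg .rcx)).toInt
        (Word.part Width.w32 (u.reg .r9)).toInt
      obtain ⟨h0, hl⟩ := hlive (by omega)
      obtain ⟨hw1, hw2, hw3⟩ := hl.where_ hsh.inv hsh.offText (by omega)
      obtain ⟨ha, hlo, hhi, hmn'⟩ := Vorbis.Spec.draw_line.pixel_addr (u.reg .rdi) _ _ _ _ h0 (Int.le_refl _)
        (by omega) hmn (by omega)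
      have hlt : (Word.part Width.w32 (u.reg .rsi)).toInt < (Word.part Width.w32 (u.reg .rcx)).toInt := by omega
      have hinc := Vorbis.Spec.draw_line.toInt_add_one _ _ hlt
      refine hloop s_1087e4 (Word.part Width.w32 (u.reg .rsi) + 1#32) (Word.part Width.w32 (u.reg .rcx)) w_rip w_rsp ?_ w_kept
        w_eq ?_ ?_ ?_ ?_ ?_ ?_ ?_ ?_ ?_ ?_ ?_ ?_ ?_ ?_ ?_ h0 hlt ?_ hl
      · rw [w_rbx, Vorbis.Spec.draw_line.lea_add_one]
      · -- the direction flag: the checks kept it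
        rw [w_flags]
        exact w_df_1087c4
      · -- the MXCSR masks after `mulss`
        rw [w_mxcsr]
        exact hmx_1087cd
      · exact SseOK.of_masks (by rw [w_mxcsr]; exact hmx_1087cd)
      · -- the footprint: the store went to `output[x0]`, the first dword of `output[x0 .. min(x1, n))`
        rw [w_mem]
        refine Mem.SameExcept.step_writeLE' _ _ _ ?_ ?_ ?_
        · u_same
        · rw [ha]
          omega
        · simp only [X86.User.inSpans_cons, X86.User.inSpans_nil, or_false]
          right
          rw [ha]
          constructor
          · omega
          · omega
      · -- no store went to the shadow
        v_untouched
      · u_frame hs0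
      · u_frame hs1
      · u_frame hs2
      · u_frame hs3
      · u_frame hs4
      · u_frame hs5
      · u_frame hs6
      · u_frame hs7
      · -- the slot of x1' = x1 (x1 ≤ n: 0x108793 overwrote the slot)
        u_resolve
        exact Nat.mod_eq_of_lt (BitVec.isLt _)
      · -- x0 < x0 + 1
        omega
      · omega
  -- 0x108720 … 0x108752 (C lines 2062–2065): the pushes, the spills, `dy`, `adx`, the call `abs(dy)`
  u_walk hcode [hμ.vendor] until [Vorbis.L.draw_line.loop1] span [Vorbis.L.textLo, Vorbis.L.textHi] side (v_side)
  case call_inv => v_inv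
  case pre_108752 =>
    show ShadowPre others frames s_108752
    refine hsh.callee ?_ ?_ ?_ ?_
    · v_untouched
    · rw [w_rsp]
      u_omega
    · rw [w_rsp]
      u_omega
    · rw [w_rsp]
      u_omega
  -- 0x108757 (cut 1, C line 2065): after `abs(dy)`; on to the `idiv`, `sy`, the call `abs(base)` on both arms of `dy < 0`
  v_after_call w_rsp_108752 w_mem_108752
  have hq0 : UInt64.ofNat (s_108752r.mem.readLE (u.reg .rsp) 8) = ret := by
    u_frame he_retAddr
  u_walk hcode [hμ.vendor] until [Vorbis.L.draw_line.loop1] span [Vorbis.L.textLo, Vorbis.L.textHi] side (v_side)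
  case side_nofault =>
    -- 0x10875d (C line 2088): `idiv r15d` does not fault: adx ≠ 0, dy ≠ INT_MIN
    exact Vorbis.Spec.draw_line.idiv_cdq_some _ _ hd hdy' hopt1
  case call_inv => v_inv
  case call_inv => v_inv
  case pre_108777 =>
    show ShadowPre others frames s_108777
    refine hsh.callee ?_ ?_ ?_ ?_
    · v_untouched
    · rw [w_rsp]
      u_omega
    · rw [w_rsp]
      u_omega
    · rw [w_rsp]
      u_omega
  case pre_108777 =>
    show ShadowPre others frames s_108777
    refine hsh.callee ?_ ?_ ?_ ?_
    · v_untouched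
    · rw [w_rsp]
      u_omega
    · rw [w_rsp]
      u_omega
    · rw [w_rsp]
      u_omega
  -- 0x10877c (cut 2, C line 2094) on both arms: the assertion of `hmid`
  all_goals (
    v_after_call w_rsp_108777 w_mem_108777
    have hs0 : UInt64.ofNat (s_108777r.mem.readLE (u.reg .rsp) 8) = ret := by u_frame hq0
    have hp1 : UInt64.ofNat (s_108752.mem.readLE (u.reg .rsp - 8) 8) = u.reg .r15 := by u_resolve
    rw [w_mem_108752] at hp1
    have hq1 : UInt64.ofNat (s_108752r.mem.readLE (u.reg .rsp - 8) 8) = u.reg .r15 := by u_frame hp1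
    have hs1 : UInt64.ofNat (s_108777r.mem.readLE (u.reg .rsp - 8) 8) = u.reg .r15 := by u_frame hq1
    have hp2 : UInt64.ofNat (s_108752.mem.readLE (u.reg .rsp - 16) 8) = u.reg .r14 := by u_resolve
    rw [w_mem_108752] at hp2
    have hq2 : UInt64.ofNat (s_108752r.mem.readLE (u.reg .rsp - 16) 8) = u.reg .r14 := by u_frame hp2
    have hs2 : UInt64.ofNat (s_108777r.mem.readLE (u.reg .rsp - 16) 8) = u.reg .r14 := by u_frame hq2
    have hp3 : UInt64.ofNat (s_108752.mem.readLE (u.reg .rsp - 24) 8) = u.reg .r13 := by u_resolve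
    rw [w_mem_108752] at hp3
    have hq3 : UInt64.ofNat (s_108752r.mem.readLE (u.reg .rsp - 24) 8) = u.reg .r13 := by u_frame hp3
    have hs3 : UInt64.ofNat (s_108777r.mem.readLE (u.reg .rsp - 24) 8) = u.reg .r13 := by u_frame hq3
    have hp4 : UInt64.ofNat (s_108752.mem.readLE (u.reg .rsp - 32) 8) = u.reg .r12 := by u_resolve
    rw [w_mem_108752] at hp4
    have hq4 : UInt64.ofNat (s_108752r.mem.readLE (u.reg .rsp - 32) 8) = u.reg .r12 := by u_frame hp4
    have hs4 : UInt64.ofNat (s_108777r.mem.readLE (u.reg .rsp - 32) 8) = u.reg .r12 := by u_frame hq4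
    have hp5 : UInt64.ofNat (s_108752.mem.readLE (u.reg .rsp - 40) 8) = u.reg .rbp := by u_resolve
    rw [w_mem_108752] at hp5
    have hq5 : UInt64.ofNat (s_108752r.mem.readLE (u.reg .rsp - 40) 8) = u.reg .rbp := by u_frame hp5
    have hs5 : UInt64.ofNat (s_108777r.mem.readLE (u.reg .rsp - 40) 8) = u.reg .rbp := by u_frame hq5
    have hp6 : UInt64.ofNat (s_108752.mem.readLE (u.reg .rsp - 48) 8) = u.reg .rbx := by u_resolve
    rw [w_mem_108752] at hp6
    have hq6 : UInt64.ofNat (s_108752r.mem.readLE (u.reg .rsp - 48) 8) = u.reg .rbx := by u_frame hp6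
    have hs6 : UInt64.ofNat (s_108777r.mem.readLE (u.reg .rsp - 48) 8) = u.reg .rbx := by u_frame hq6
    have hp7 : UInt64.ofNat (s_108752.mem.readLE (u.reg .rsp - 80) 8) = u.reg .rdi := by u_resolve
    rw [w_mem_108752] at hp7
    have hq7 : UInt64.ofNat (s_108752r.mem.readLE (u.reg .rsp - 80) 8) = u.reg .rdi := by u_frame hp7
    have hs7 : UInt64.ofNat (s_108777r.mem.readLE (u.reg .rsp - 80) 8) = u.reg .rdi := by u_frame hq7
    have hp8 : s_108752.mem.readLE (u.reg .rsp - 84) 4 = (Word.part Width.w32 (u.reg .r9)).toNat := by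
      u_resolve
      exact Nat.mod_eq_of_lt (BitVec.isLt _)
    rw [w_mem_108752] at hp8
    have hq8 : s_108752r.mem.readLE (u.reg .rsp - 84) 4 = (Word.part Width.w32 (u.reg .r9)).toNat := by u_frame hp8
    have hs8 : s_108777r.mem.readLE (u.reg .rsp - 84) 4 = (Word.part Width.w32 (u.reg .r9)).toNat := by u_frame hq8
    have hsame : Mem.SameExcept [⟨(u.reg .rsp).toNat - 112, (u.reg .rsp).toNat⟩] u.mem s_108777r.mem := by
      u_same
    have hun : ShadowUntouched u.mem s_108777r.mem := by v_untouched
    exact hmid s_108777r w_rip w_rsp w_r14 w_rbp w_kept w_eq w_df w_mx w_sse hsame hun hs0 hs1 hs2 hs3 hs4 hs5 hs6 hs7 hs8)
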